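-- pv_equiv track=rewrite | github.com/tesolberg/arr-data-manager | report_generator.py | number_of_pain_regions
-- ===== SOURCE A (Python) =====
-- def number_of_pain_regions(data):
--     # samle alle fibrokoder i en array
--     smerteomraader = []
--     for key in data:
--         if (key[:21] == "fibro-smerteomraader_"):
--             smerteomraader.append(data[key])
--
--     counter = 0
--
--     # Øvre venstre
--     if "skulder-ven" in smerteomraader or "overarm-ven" in smerteomraader or "underarm-ven" in smerteomraader:
--         counter += 1
--     # Øvre høyre
--     if "skulder-hoy" in smerteomraader or "overarm-hoy" in smerteomraader or "underarm-hoy" in smerteomraader: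
--         counter += 1
--     # Nedre venstre
--     if "hofte-ven" in smerteomraader or "legg-fot-ven" in smerteomraader or "laar-kne-ven" in smerteomraader:
--         counter += 1
--     # Nedre høyre
--     if "hofte-hoy" in smerteomraader or "legg-fot-hoy" in smerteomraader or "laar-kne-hoy" in smerteomraader:
--         counter += 1
--     # Midtregion
--     if "ovre-rygg" in smerteomraader or "korsrygg" in smerteomraader or "nakke-hals" in smerteomraader:
--         counter += 1
--
--     return counter
-- ===== SOURCE B (Python) =====
-- PREFIX = "fibro-smerteomraader_"
--
-- # Each code maps to the bit of its region; unknown codes map to 0 (no bit).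
-- REGION_BIT = {
--     "skulder-ven": 1, "overarm-ven": 1, "underarm-ven": 1,
--     "skulder-hoy": 2, "overarm-hoy": 2, "underarm-hoy": 2,
--     "hofte-ven": 4, "legg-fot-ven": 4, "laar-kne-ven": 4,
--     "hofte-hoy": 8, "legg-fot-hoy": 8, "laar-kne-hoy": 8,
--     "ovre-rygg": 16, "korsrygg": 16, "nakke-hals": 16,
-- }
--
--
-- def number_of_pain_regions(data):
--     mask = 0
--     for key, value in data.items():
--         if key.startswith(PREFIX):
--             mask |= REGION_BIT.get(value, 0)
--     return mask.bit_count()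
-- ===== Notes on version B (the rewrite author's own statement) =====
-- stated objective: alternative
-- what changed: Replaces A's intermediate code list plus five unrolled membership-test if-blocks with a single pass that ORs per-code region bits from a lookup table into a bitmask and returns its popcount.
import Mathlib
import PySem

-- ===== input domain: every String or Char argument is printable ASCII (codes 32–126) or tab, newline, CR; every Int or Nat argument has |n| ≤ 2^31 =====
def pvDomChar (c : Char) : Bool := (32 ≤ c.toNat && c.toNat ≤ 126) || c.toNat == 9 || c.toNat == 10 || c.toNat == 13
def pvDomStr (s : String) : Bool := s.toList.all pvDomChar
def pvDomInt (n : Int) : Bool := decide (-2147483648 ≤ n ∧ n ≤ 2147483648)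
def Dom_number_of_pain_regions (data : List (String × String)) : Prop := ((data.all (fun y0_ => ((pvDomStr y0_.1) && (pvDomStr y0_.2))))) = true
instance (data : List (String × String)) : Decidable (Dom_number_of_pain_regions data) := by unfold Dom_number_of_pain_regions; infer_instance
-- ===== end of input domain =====

-- B replaces A's intermediate code list and five unrolled membership-test blocks by one
-- pass ORing region bits from a code->bit table into a mask, returning its popcount (alternative algorithm).


-- ===== PORT A =====
-- 'for key in data: if key[:21] == "fibro-smerteomraader_": smerteomraader.append(data[key])'
-- (dict iteration: the association list has unique keys, so data[key] is the pair's value)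
def number_of_pain_regions (data : List (String × String)) : Int :=
  let smerteomraader : List String :=
    data.foldl (fun acc kv =>
      if PySem.Str.slice kv.1 none (some 21) == "fibro-smerteomraader_" then acc ++ [kv.2]
      else acc) []
  let counter : Int := 0
  let counter := if smerteomraader.contains "skulder-ven" || smerteomraader.contains "overarm-ven" || smerteomraader.contains "underarm-ven" then counter + 1 else counter
  let counter := if smerteomraader.contains "skulder-hoy" || smerteomraader.contains "overarm-hoy" || smerteomraader.contains "underarm-hoy" then counter + 1 else counter
  let counter := if smerteomraader.contains "hofte-ven" || smerteomraader.contains "legg-fot-ven" || smerteomraader.contains "laar-kne-ven" then counter + 1 else counter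
  let counter := if smerteomraader.contains "hofte-hoy" || smerteomraader.contains "legg-fot-hoy" || smerteomraader.contains "laar-kne-hoy" then counter + 1 else counter
  let counter := if smerteomraader.contains "ovre-rygg" || smerteomraader.contains "korsrygg" || smerteomraader.contains "nakke-hals" then counter + 1 else counter
  counter

-- ===== PORT B =====
-- REGION_BIT: each code maps to the bit of its region; .get(value, 0) gives 0 for unknown codes
def pvRegionBit : PySem.Dict String Int := PySem.Dict.ofList
  [("skulder-ven", 1), ("overarm-ven", 1), ("underarm-ven", 1),
   ("skulder-hoy", 2), ("overarm-hoy", 2), ("underarm-hoy", 2),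
   ("hofte-ven", 4), ("legg-fot-ven", 4), ("laar-kne-ven", 4),
   ("hofte-hoy", 8), ("legg-fot-hoy", 8), ("laar-kne-hoy", 8),
   ("ovre-rygg", 16), ("korsrygg", 16), ("nakke-hals", 16)]

-- 'mask |= REGION_BIT.get(value, 0)' for the prefixed keys; 'return mask.bit_count()'
def number_of_pain_regions_alt (data : List (String × String)) : Int :=
  let mask : Int :=
    data.foldl (fun m kv =>
      if PySem.Str.startswith kv.1 "fibro-smerteomraader_" then
        PySem.Int.bor m (pvRegionBit.getD kv.2 0)
      else m) 0
  (PySem.Int.bitCount mask : Int)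

-- ===== PRECONDITION & SPEC =====
def Spec_number_of_pain_regions (data : List (String × String)) (out : Int) : Prop := out = number_of_pain_regions_alt data
instance (data : List (String × String)) (out : Int) : Decidable (Spec_number_of_pain_regions data out) := by unfold Spec_number_of_pain_regions; infer_instance

-- ===== CLAIM (what is proved, stated in full; the proofs are below) =====
def Claim_equal_number_of_pain_regions : Prop := ∀ (data : List (String × String)), Dom_number_of_pain_regions data → Spec_number_of_pain_regions data (number_of_pain_regions data)

-- ===== LEMMAS AND PROOFS =====

-- A's slice test 'key[:21] == PREFIX' is B's startswith (PREFIX has length 21)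
lemma pv_cond_eq (s : String) :
    (PySem.Str.slice s none (some 21) == "fibro-smerteomraader_") =
    PySem.Str.startswith s "fibro-smerteomraader_" := by
  rw [Bool.eq_iff_iff, beq_iff_eq]
  have h21 : PySem.List.slice s.toList none (some 21) = s.toList.take 21 := by
    have := PySem.List.slice_to_natCast s.toList 21
    simpa using this
  constructor
  · intro h
    rw [PySem.Str.startswith_eq, PySem.Chars.startswith_iff]
    have := congrArg String.toList h
    rw [PySem.Str.toList_slice] at this
    simp only [PySem.Chars.slice_eq_listSlice, h21] at this
    rw [List.prefix_iff_eq_take]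
    simpa using this.symm
  · intro h
    rw [PySem.Str.startswith_eq, PySem.Chars.startswith_iff] at h
    rw [List.prefix_iff_eq_take] at h
    apply String.toList_inj.mp
    rw [PySem.Str.toList_slice]
    simp only [PySem.Chars.slice_eq_listSlice, h21]
    simpa using h.symm

-- the indicator-sum normal form of a mask with the five region bits b0..b4
def pvMaskOf (b0 b1 b2 b3 b4 : Bool) : Int :=
  (if b0 then 1 else 0) + (if b1 then 2 else 0) + (if b2 then 4 else 0) +
  (if b3 then 8 else 0) + (if b4 then 16 else 0)

-- the five region conditions of a code list
def pvC0 (L : List String) : Bool := L.contains "skulder-ven" || L.contains "overarm-ven" || L.contains "underarm-ven"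
def pvC1 (L : List String) : Bool := L.contains "skulder-hoy" || L.contains "overarm-hoy" || L.contains "underarm-hoy"
def pvC2 (L : List String) : Bool := L.contains "hofte-ven" || L.contains "legg-fot-ven" || L.contains "laar-kne-ven"
def pvC3 (L : List String) : Bool := L.contains "hofte-hoy" || L.contains "legg-fot-hoy" || L.contains "laar-kne-hoy"
def pvC4 (L : List String) : Bool := L.contains "ovre-rygg" || L.contains "korsrygg" || L.contains "nakke-hals"

lemma pv_bor_mask : ∀ (i : Fin 5) (b0 b1 b2 b3 b4 : Bool),
    PySem.Int.bor (pvMaskOf b0 b1 b2 b3 b4) (2 ^ i.1) =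
    pvMaskOf (b0 || i.1 == 0) (b1 || i.1 == 1) (b2 || i.1 == 2) (b3 || i.1 == 3) (b4 || i.1 == 4) := by
  decide

-- B's mask fold over a code list L equals the indicator-sum of the five region conditions
lemma pv_mask_fold (L : List String) (b0 b1 b2 b3 b4 : Bool) :
    L.foldl (fun m v => PySem.Int.bor m (pvRegionBit.getD v 0)) (pvMaskOf b0 b1 b2 b3 b4) =
    pvMaskOf (b0 || pvC0 L) (b1 || pvC1 L) (b2 || pvC2 L) (b3 || pvC3 L) (b4 || pvC4 L) := by
  induction L generalizing b0 b1 b2 b3 b4 with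
  | nil => simp [pvC0, pvC1, pvC2, pvC3, pvC4]
  | cons v L ih =>
    simp only [List.foldl_cons]
    by_cases h0 : "skulder-ven" = v
    · subst h0
      rw [show pvRegionBit.getD "skulder-ven" 0 = 2 ^ ((0 : Fin 5)).1 from by decide, pv_bor_mask, ih]
      simp [pvC0, pvC1, pvC2, pvC3, pvC4]
    by_cases h1 : "overarm-ven" = v
    · subst h1
      rw [show pvRegionBit.getD "overarm-ven" 0 = 2 ^ ((0 : Fin 5)).1 from by decide, pv_bor_mask, ih]
      simp [pvC0, pvC1, pvC2, pvC3, pvC4]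
    by_cases h2 : "underarm-ven" = v
    · subst h2
      rw [show pvRegionBit.getD "underarm-ven" 0 = 2 ^ ((0 : Fin 5)).1 from by decide, pv_bor_mask, ih]
      simp [pvC0, pvC1, pvC2, pvC3, pvC4]
    by_cases h3 : "skulder-hoy" = v
    · subst h3
      rw [show pvRegionBit.getD "skulder-hoy" 0 = 2 ^ ((1 : Fin 5)).1 from by decide, pv_bor_mask, ih]
      simp [pvC0, pvC1, pvC2, pvC3, pvC4]
    by_cases h4 : "overarm-hoy" = v
    · subst h4
      rw [show pvRegionBit.getD "overarm-hoy" 0 = 2 ^ ((1 : Fin 5)).1 from by decide, pv_bor_mask, ih]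
      simp [pvC0, pvC1, pvC2, pvC3, pvC4]
    by_cases h5 : "underarm-hoy" = v
    · subst h5
      rw [show pvRegionBit.getD "underarm-hoy" 0 = 2 ^ ((1 : Fin 5)).1 from by decide, pv_bor_mask, ih]
      simp [pvC0, pvC1, pvC2, pvC3, pvC4]
    by_cases h6 : "hofte-ven" = v
    · subst h6
      rw [show pvRegionBit.getD "hofte-ven" 0 = 2 ^ ((2 : Fin 5)).1 from by decide, pv_bor_mask, ih]
      simp [pvC0, pvC1, pvC2, pvC3, pvC4]
    by_cases h7 : "legg-fot-ven" = v
    · subst h7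
      rw [show pvRegionBit.getD "legg-fot-ven" 0 = 2 ^ ((2 : Fin 5)).1 from by decide, pv_bor_mask, ih]
      simp [pvC0, pvC1, pvC2, pvC3, pvC4]
    by_cases h8 : "laar-kne-ven" = v
    · subst h8
      rw [show pvRegionBit.getD "laar-kne-ven" 0 = 2 ^ ((2 : Fin 5)).1 from by decide, pv_bor_mask, ih]
      simp [pvC0, pvC1, pvC2, pvC3, pvC4]
    by_cases h9 : "hofte-hoy" = v
    · subst h9
      rw [show pvRegionBit.getD "hofte-hoy" 0 = 2 ^ ((3 : Fin 5)).1 from by decide, pv_bor_mask, ih]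
      simp [pvC0, pvC1, pvC2, pvC3, pvC4]
    by_cases h10 : "legg-fot-hoy" = v
    · subst h10
      rw [show pvRegionBit.getD "legg-fot-hoy" 0 = 2 ^ ((3 : Fin 5)).1 from by decide, pv_bor_mask, ih]
      simp [pvC0, pvC1, pvC2, pvC3, pvC4]
    by_cases h11 : "laar-kne-hoy" = v
    · subst h11
      rw [show pvRegionBit.getD "laar-kne-hoy" 0 = 2 ^ ((3 : Fin 5)).1 from by decide, pv_bor_mask, ih]
      simp [pvC0, pvC1, pvC2, pvC3, pvC4]
    by_cases h12 : "ovre-rygg" = v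
    · subst h12
      rw [show pvRegionBit.getD "ovre-rygg" 0 = 2 ^ ((4 : Fin 5)).1 from by decide, pv_bor_mask, ih]
      simp [pvC0, pvC1, pvC2, pvC3, pvC4]
    by_cases h13 : "korsrygg" = v
    · subst h13
      rw [show pvRegionBit.getD "korsrygg" 0 = 2 ^ ((4 : Fin 5)).1 from by decide, pv_bor_mask, ih]
      simp [pvC0, pvC1, pvC2, pvC3, pvC4]
    by_cases h14 : "nakke-hals" = v
    · subst h14
      rw [show pvRegionBit.getD "nakke-hals" 0 = 2 ^ ((4 : Fin 5)).1 from by decide, pv_bor_mask, ih]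
      simp [pvC0, pvC1, pvC2, pvC3, pvC4]
    rw [show pvRegionBit.getD v 0 = 0 from by
          have hd : pvRegionBit = PySem.Dict.mk
            [("skulder-ven", 1), ("overarm-ven", 1), ("underarm-ven", 1),
             ("skulder-hoy", 2), ("overarm-hoy", 2), ("underarm-hoy", 2),
             ("hofte-ven", 4), ("legg-fot-ven", 4), ("laar-kne-ven", 4),
             ("hofte-hoy", 8), ("legg-fot-hoy", 8), ("laar-kne-hoy", 8),
             ("ovre-rygg", 16), ("korsrygg", 16), ("nakke-hals", 16)] := by decide
          simp [hd, PySem.Dict.getD, PySem.Dict.get?, h0, h1, h2, h3, h4, h5, h6, h7, h8, h9, h10, h11, h12, h13, h14],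
        PySem.Int.bor_zero, ih]
    simp [pvC0, pvC1, pvC2, pvC3, pvC4, h0, h1, h2, h3, h4, h5, h6, h7, h8, h9, h10, h11, h12, h13, h14]

-- fold with an if over pairs = fold over the filtered values
lemma pv_fold_filter (data : List (String × String)) (m : Int) :
    data.foldl (fun m kv =>
      if PySem.Str.startswith kv.1 "fibro-smerteomraader_" then
        PySem.Int.bor m (pvRegionBit.getD kv.2 0)
      else m) m =
    ((data.filter (fun kv => PySem.Str.startswith kv.1 "fibro-smerteomraader_")).map (·.2)).foldl
      (fun m v => PySem.Int.bor m (pvRegionBit.getD v 0)) m := by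
  induction data generalizing m with
  | nil => rfl
  | cons kv data ih =>
    simp only [List.foldl_cons, List.filter_cons]
    by_cases h : PySem.Str.startswith kv.1 "fibro-smerteomraader_" = true <;>
      simp only [h, if_true, if_false, Bool.false_eq_true, List.map_cons, List.foldl_cons, ih]

-- the A-side if-chain equals the popcount of the corresponding mask
lemma pv_chain (b0 b1 b2 b3 b4 : Bool) :
    (let c : Int := 0
     let c := if b0 then c + 1 else c
     let c := if b1 then c + 1 else c
     let c := if b2 then c + 1 else c
     let c := if b3 then c + 1 else c
     let c := if b4 then c + 1 else c
     c) = (PySem.Int.bitCount (pvMaskOf b0 b1 b2 b3 b4) : Int) := by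
  revert b0 b1 b2 b3 b4; decide

-- ===== VERDICT (by name: the statement is the Claim_ definition above) =====
theorem number_of_pain_regions_spec : Claim_equal_number_of_pain_regions := by
  intro data _
  unfold Spec_number_of_pain_regions number_of_pain_regions number_of_pain_regions_alt
  rw [PySem.List.foldl_append_if]
  rw [List.filter_congr (fun kv _ => pv_cond_eq kv.1)]
  rw [pv_fold_filter]
  have hB := pv_mask_fold
    ((data.filter (fun kv => PySem.Str.startswith kv.1 "fibro-smerteomraader_")).map (·.2))
    false false false false false
  simp only [Bool.false_or] at hB
  rw [show List.foldl (fun m v => PySem.Int.bor m (pvRegionBit.getD v 0)) 0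
        ((data.filter (fun kv => PySem.Str.startswith kv.1 "fibro-smerteomraader_")).map (·.2)) = _
      from hB]
  rw [← pv_chain]
  rfl
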